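-- pv_equiv track=rewrite | github.com/shravyapendota/python-dsa | binary-nums.py | generate_bin
-- ===== SOURCE A (Python) =====
-- def generate_bin(n):
--     result = []
--     q = []
--     q.append("1")
--
--     for _ in range(n):
--         temp = q.pop(0)
--         result.append(temp)
--         q.append(temp + "0")
--         q.append(temp + "1")
--
--     return result
-- ===== SOURCE B (Python) =====
-- def to_bin(i):
--     # binary representation of a non-negative int (no prefix)
--     return to_bin(i // 2) + str(i % 2) if i >= 2 else str(i)
--
-- def generate_bin(n):
--     return [to_bin(i) for i in range(1, n + 1)]
-- ===== Notes on version B (the rewrite author's own statement) =====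
-- stated objective: simpler
-- what changed: Replaced the BFS queue of growing strings with a direct enumeration: the i-th output is the binary representation of i, computed independently for each i in range(1, n+1).
import Mathlib
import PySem

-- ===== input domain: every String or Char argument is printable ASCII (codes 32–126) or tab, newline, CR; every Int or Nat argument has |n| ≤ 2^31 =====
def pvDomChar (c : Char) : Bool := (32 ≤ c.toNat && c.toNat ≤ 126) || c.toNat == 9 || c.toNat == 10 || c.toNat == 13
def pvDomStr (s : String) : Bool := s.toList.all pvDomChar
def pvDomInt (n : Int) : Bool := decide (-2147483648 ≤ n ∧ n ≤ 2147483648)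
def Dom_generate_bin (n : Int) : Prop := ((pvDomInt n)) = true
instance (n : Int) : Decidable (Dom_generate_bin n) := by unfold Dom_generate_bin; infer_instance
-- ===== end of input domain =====

-- B replaces A's BFS queue of growing strings by a direct per-index binary conversion (simpler).

-- ===== PORT A =====
-- the for-loop: fuel = remaining iterations, state = (result, q); q.pop(0) is the head
-- (q is never empty while the loop runs: it starts as ["1"] and gains one element net
-- per iteration, so the [] branch is unreachable)
def generateBinLoop : Nat → List String → List String → List String
  | 0, result, _ => result
  | _ + 1, result, [] => result
  | k + 1, result, temp :: q =>
      generateBinLoop k (result ++ [temp]) (q ++ [temp ++ "0", temp ++ "1"])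

def generate_bin (n : Int) : List String := generateBinLoop n.toNat [] ["1"]

-- ===== PORT B =====
-- to_bin: 'to_bin(i // 2) + str(i % 2) if i >= 2 else str(i)'; exact for i ≥ 0
-- (every i produced by range(1, n+1) is ≥ 1), where i // 2 = i / 2 on Nat and
-- str(i % 2) is '0' or '1'
def toBinChars (m : Nat) : List Char :=
  if m ≥ 2 then toBinChars (m / 2) ++ [if m % 2 = 0 then '0' else '1']
  else if m = 1 then ['1'] else ['0']
decreasing_by omega

def generate_bin_alt (n : Int) : List String :=
  (PySem.List.pyRange 1 (n + 1) 1).map (fun i => String.ofList (toBinChars i.toNat))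

-- ===== PRECONDITION & SPEC =====
def Spec_generate_bin (n : Int) (out : List String) : Prop := out = generate_bin_alt n
instance (n : Int) (out : List String) : Decidable (Spec_generate_bin n out) := by unfold Spec_generate_bin; infer_instance

-- ===== CLAIM (what is proved, stated in full; the proofs are below) =====
def Claim_equal_generate_bin : Prop := ∀ (n : Int), Dom_generate_bin n → Spec_generate_bin n (generate_bin n)

-- ===== LEMMAS AND PROOFS =====

def bstr (m : Nat) : String := String.ofList (toBinChars m)

theorem bstr_two_mul (m : Nat) (h : 1 ≤ m) : bstr (2 * m) = bstr m ++ "0" := by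
  unfold bstr
  rw [toBinChars]
  rw [if_pos (show 2 * m ≥ 2 by omega)]
  rw [show 2 * m / 2 = m by omega, show 2 * m % 2 = 0 by omega]
  rw [if_pos rfl, String.ofList_append]

theorem bstr_two_mul_add_one (m : Nat) (h : 1 ≤ m) : bstr (2 * m + 1) = bstr m ++ "1" := by
  unfold bstr
  rw [toBinChars]
  rw [if_pos (show 2 * m + 1 ≥ 2 by omega)]
  rw [show (2 * m + 1) / 2 = m by omega, show (2 * m + 1) % 2 = 1 by omega]
  rw [if_neg (by omega), String.ofList_append]

-- the loop invariant: after popping down to position `start`, the queue holds the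
-- binary strings of the contiguous block [start, 2*start)
theorem loop_inv (k : Nat) : ∀ (start : Nat) (res : List String), 1 ≤ start →
    generateBinLoop k res ((List.range' start start).map bstr)
      = res ++ (List.range' start k).map bstr := by
  induction k with
  | zero => intro start res _; simp [generateBinLoop]
  | succ k ih =>
    intro start res hs
    obtain ⟨s, rfl⟩ : ∃ s, start = s + 1 := ⟨start - 1, by omega⟩
    rw [List.range'_succ, List.map_cons]
    show generateBinLoop k (res ++ [bstr (s + 1)])
        ((List.range' (s + 1 + 1) s).map bstr ++ [bstr (s + 1) ++ "0", bstr (s + 1) ++ "1"])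
      = res ++ (List.range' (s + 1) (k + 1)).map bstr
    have h1 : List.range' (s + 2) (s + 2)
        = List.range' (s + 2) s ++ [2 * (s + 1), 2 * (s + 1) + 1] := by
      rw [List.range'_concat, List.range'_concat]
      simp
      omega
    have hq : (List.range' (s + 1 + 1) s).map bstr
        ++ [bstr (s + 1) ++ "0", bstr (s + 1) ++ "1"]
        = (List.range' (s + 2) (s + 2)).map bstr := by
      rw [h1, List.map_append]
      simp [bstr_two_mul (s + 1) (by omega), bstr_two_mul_add_one (s + 1) (by omega)]
    rw [hq, ih (s + 2) (res ++ [bstr (s + 1)]) (by omega)]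
    rw [List.range'_succ, List.map_cons]
    simp

theorem generate_bin_eq (n : Int) :
    generate_bin n = (List.range' 1 n.toNat).map bstr := by
  unfold generate_bin
  have hb1 : (["1"] : List String) = (List.range' 1 1).map bstr := by
    rw [show List.range' 1 1 = [1] from rfl, List.map_cons, List.map_nil]
    rw [bstr, toBinChars]
    rw [if_neg (by omega), if_pos rfl]
  rw [hb1, loop_inv n.toNat 1 [] (by omega)]
  simp

-- ===== VERDICT (by name: the statement is the Claim_ definition above) =====
theorem generate_bin_spec : Claim_equal_generate_bin := by
  intro n _
  unfold Spec_generate_bin generate_bin_alt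
  rw [generate_bin_eq, PySem.List.pyRange_one]
  rw [show (n + 1 - 1 : Int).toNat = n.toNat by omega]
  rw [List.range'_eq_map_range, List.map_map, List.map_map]
  apply List.map_congr_left
  intro k _
  show bstr (1 + k) = String.ofList (toBinChars ((1 : Int) + (k : Int)).toNat)
  rw [show ((1 : Int) + (k : Int)).toNat = 1 + k by omega]
  rfl
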